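-- pv_equiv track=rewrite | github.com/kobejean/cp-library | cp_library/math/conv/superset_zeta_pair_fn.py | superset_zeta_pair
-- ===== SOURCE A (Python) =====
-- def superset_zeta_pair(A: list[int], B: list[int], N: int):
--     Z = len(A)
--     for i in range(N):
--         m = b = 1<<i
--         while m < Z:
--             A[m ^ b] += A[m]
--             B[m ^ b] += B[m]
--             m = m+1|b
--     return A
-- ===== SOURCE B (Python) =====
-- def superset_zeta_pair(A, B, N):
--     # Direct definition of the superset-zeta transform: out[t] is the sum of A[s]
--     # over all in-range supersets s of t that differ from t only in the low N bits.
--     # (Side effects: like the original we assign the transformed values in place;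
--     # here each array is transformed over its own length.)
--     mask = (1 << N) - 1 if N > 0 else 0
--     Za, Zb = len(A), len(B)
--     ra = [sum(A[s] for s in range(Za) if s & t == t and (s ^ t) & mask == s ^ t)
--           for t in range(Za)]
--     rb = [sum(B[s] for s in range(Zb) if s & t == t and (s ^ t) & mask == s ^ t)
--           for t in range(Zb)]
--     A[:] = ra
--     B[:] = rb
--     return A
-- ===== Notes on version B (the rewrite author's own statement) =====
-- stated objective: alternative
-- what changed: B replaces the iterative bit-layer DP (N in-place sweeps with the m=(m+1)|b iterator) by the defining closed-form summation: for each index t it sums A[s] over all in-range supersets s of t within the low N bits, built as fresh lists and assigned back; this trades A's O(Z*min(N,log Z)) speed for an O(Z^2) direct computation.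
import Mathlib
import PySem

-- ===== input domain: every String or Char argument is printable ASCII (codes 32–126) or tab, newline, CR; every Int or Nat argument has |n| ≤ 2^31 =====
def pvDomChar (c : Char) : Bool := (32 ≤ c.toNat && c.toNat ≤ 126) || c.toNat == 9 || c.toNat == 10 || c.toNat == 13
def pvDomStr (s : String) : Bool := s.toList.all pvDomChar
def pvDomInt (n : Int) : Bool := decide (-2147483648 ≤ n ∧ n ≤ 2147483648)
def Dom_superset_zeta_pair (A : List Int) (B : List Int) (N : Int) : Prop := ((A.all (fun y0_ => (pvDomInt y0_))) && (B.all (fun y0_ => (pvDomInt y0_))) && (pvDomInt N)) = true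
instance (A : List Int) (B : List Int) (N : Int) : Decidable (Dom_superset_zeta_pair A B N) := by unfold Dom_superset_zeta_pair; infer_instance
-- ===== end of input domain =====

-- B replaces A's iterative in-place bit-layer sweeps by the defining closed-form summation
-- (out[t] = sum of the in-range supersets of t within the low N bits), built as fresh lists.
-- The equivalence proved is about the RETURN value (both Pythons also mutate their list
-- arguments in place; B assigns each array its own transform over its own length, so the
-- in-place effect on the second array differs from A's when the two lists' lengths differ).

-- ===== PORT A =====
-- inner 'while m < Z' loop of A; fuel = Z suffices: m starts at b ≥ 1 and grows by ≥ 1 per step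
def pvAInner (b Z : Nat) : Nat → Nat → List Int × List Int → List Int × List Int
  | _, 0, st => st
  | m, fuel+1, st =>
    if m < Z then
      pvAInner b Z ((m+1) ||| b) fuel
        (st.1.set (m ^^^ b) (st.1.getD (m ^^^ b) 0 + st.1.getD m 0),
         st.2.set (m ^^^ b) (st.2.getD (m ^^^ b) 0 + st.2.getD m 0))
    else st

def superset_zeta_pair (A : List Int) (B : List Int) (N : Int) : List Int :=
  let Z := A.length
  ((PySem.List.pyRange 0 N 1).foldl
    (fun st i =>
      let b := 2 ^ i.toNat
      pvAInner b Z b Z st) (A, B)).1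

-- ===== PORT B =====
-- _rb mirrors Source B's transform of the second list; in Python it only mutates the argument
-- in place and never reaches the return value, which is the transformed first list.
def superset_zeta_pair_alt (A : List Int) (B : List Int) (N : Int) : List Int :=
  let mask : Nat := if 0 < N then 2 ^ N.toNat - 1 else 0
  let ra := (List.range A.length).map (fun t =>
    (List.range A.length).foldl
      (fun acc s => if s &&& t == t && ((s ^^^ t) &&& mask == s ^^^ t) then acc + A.getD s 0 else acc) 0)
  let _rb := (List.range B.length).map (fun t =>
    (List.range B.length).foldl
      (fun acc s => if s &&& t == t && ((s ^^^ t) &&& mask == s ^^^ t) then acc + B.getD s 0 else acc) 0)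
  ra

-- ===== PRECONDITION & SPEC =====
-- Exactly the inputs on which the Python A returns: A raises IndexError iff some touched index
-- (an m < len(A) with a set bit below N, i.e. 2^min(N,len(A)) does not divide m) falls outside B.
def Pre_superset_zeta_pair (A : List Int) (B : List Int) (N : Int) : Prop :=
  ∀ m < A.length, 0 < m → ¬ ((2:Nat) ^ (min N.toNat A.length) ∣ m) → m < B.length

instance (A : List Int) (B : List Int) (N : Int) : Decidable (Pre_superset_zeta_pair A B N) := by
  unfold Pre_superset_zeta_pair; infer_instance

def pvWitness_superset_zeta_pair : List Int × List Int × Int := ([1, 2, 3, 4], [5, 6, 7, 8], 2)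

def Spec_superset_zeta_pair (A : List Int) (B : List Int) (N : Int) (out : List Int) : Prop := out = superset_zeta_pair_alt A B N
instance (A : List Int) (B : List Int) (N : Int) (out : List Int) : Decidable (Spec_superset_zeta_pair A B N out) := by unfold Spec_superset_zeta_pair; infer_instance

-- ===== CLAIM (what is proved, stated in full; the proofs are below) =====
def Claim_equal_superset_zeta_pair : Prop := ∀ (A : List Int) (B : List Int) (N : Int), Dom_superset_zeta_pair A B N → Pre_superset_zeta_pair A B N → Spec_superset_zeta_pair A B N (superset_zeta_pair A B N)

-- ===== LEMMAS AND PROOFS =====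

-- ---- single-bit arithmetic toolkit ----
lemma pv_tb_iff (x i : Nat) : x.testBit i = true ↔ x / 2^i % 2 = 1 := by
  simp [Nat.testBit, Nat.shiftRight_eq_div_pow]

lemma pv_digit (x i : Nat) : x % 2^(i+1) = x % 2^i + 2^i * (x / 2^i % 2) := by
  rw [Nat.pow_succ, Nat.mod_mul]

lemma pv_and_ne_iff (x i : Nat) : x &&& 2^i ≠ 0 ↔ 2^i ≤ x % (2^(i+1)) := by
  have hd := pv_digit x i
  have h3 : x % 2^i < 2^i := Nat.mod_lt _ (Nat.two_pow_pos i)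
  rw [Nat.and_two_pow]
  rcases h : x.testBit i
  · have h' : x / 2^i % 2 = 0 := by
      have := (pv_tb_iff x i).symm
      rcases Nat.mod_two_eq_zero_or_one (x / 2^i) with h0 | h1
      · exact h0
      · rw [h, eq_comm] at this; simp at this; omega
    rw [h'] at hd; simp; omega
  · rw [pv_tb_iff] at h; rw [h] at hd; simp; omega

lemma pv_tb_and (x k : Nat) : x &&& 2^k = 0 ↔ x.testBit k = false := by
  have := Nat.two_pow_pos k
  rw [Nat.and_two_pow]
  rcases h : x.testBit k <;> simp

lemma pv_lor_add (a : Nat) : ∀ b, a &&& b = 0 → a ||| b = a + b := by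
  induction a using Nat.binaryRec with
  | zero => intro b _; simp
  | bit x m ih =>
    intro b h
    induction b using Nat.binaryRec with
    | zero => simp
    | bit y n _ =>
      rw [Nat.land_bit] at h
      rw [Nat.bit_eq_zero_iff] at h
      obtain ⟨h1, h2⟩ := h
      rw [Nat.lor_bit, ih n h1, Nat.bit_val, Nat.bit_val, Nat.bit_val]
      rcases x <;> rcases y <;> simp_all <;> omega

lemma pv_xor_sub (x i : Nat) (h : x &&& 2^i ≠ 0) :
    x ^^^ 2^i = x - 2^i ∧ (x ^^^ 2^i) &&& 2^i = 0 ∧ 2^i ≤ x := by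
  have htb : x.testBit i = true := by
    rcases hh : x.testBit i; · rw [Nat.and_two_pow, hh] at h; simp at h
    · rfl
  have hclear : (x ^^^ 2^i) &&& 2^i = 0 := by
    rw [Nat.and_two_pow, Nat.testBit_xor, htb, Nat.testBit_two_pow_self]; simp
  have hadd : (x ^^^ 2^i) ||| 2^i = (x ^^^ 2^i) + 2^i := pv_lor_add _ _ hclear
  have hor : (x ^^^ 2^i) ||| 2^i = x := by
    apply Nat.eq_of_testBit_eq
    intro j
    rcases eq_or_ne j i with rfl | hj
    · simp [Nat.testBit_two_pow_self, htb]
    · simp [Nat.testBit_xor, Nat.testBit_two_pow_of_ne (Ne.symm hj)]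
  have : x = (x ^^^ 2^i) + 2^i := hor.symm.trans hadd
  refine ⟨by omega, hclear, by omega⟩

lemma pv_lor_self_bit (x i : Nat) (h : x &&& 2^i ≠ 0) : x ||| 2^i = x := by
  have htb : x.testBit i = true := by
    rcases hh : x.testBit i; · rw [Nat.and_two_pow, hh] at h; simp at h
    · rfl
  apply Nat.eq_of_testBit_eq
  intro j
  rcases eq_or_ne j i with rfl | hj
  · simp [Nat.testBit_two_pow_self, htb]
  · simp [Nat.testBit_two_pow_of_ne (Ne.symm hj)]

lemma pv_add_bit_and_self (t i : Nat) (h : t &&& 2^i = 0) : (t + 2^i) &&& 2^i ≠ 0 := by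
  have : t + 2^i = t ||| 2^i := (pv_lor_add t _ h).symm
  rw [this, Nat.and_or_distrib_right, h, Nat.and_self]
  have := Nat.two_pow_pos i
  simp

-- the iterator step m ↦ (m+1) ||| b jumps exactly to the next index with bit i set
lemma pv_next (m i : Nat) (hm : m &&& 2^i ≠ 0) :
    ((m+1) ||| 2^i) &&& 2^i ≠ 0 ∧ m < (m+1) ||| 2^i ∧
      ∀ s, m < s → s < (m+1) ||| 2^i → s &&& 2^i = 0 := by
  have hb : (0:Nat) < 2^i := Nat.two_pow_pos i
  have hB : (0:Nat) < 2^(i+1) := Nat.two_pow_pos (i+1)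
  have hpow : (2:Nat)^(i+1) = 2*2^i := by ring
  have hr := (pv_and_ne_iff m i).mp hm
  have hrlt : m % 2^(i+1) < 2^(i+1) := Nat.mod_lt _ hB
  have hdm := Nat.div_add_mod m (2^(i+1))
  have hq : 2^(i+1)*(m/2^(i+1)+1) = 2^(i+1)*(m/2^(i+1)) + 2^(i+1) := by ring
  by_cases hcase : m % 2^(i+1) + 1 < 2^(i+1)
  · have hmod : (m+1) % 2^(i+1) = m % 2^(i+1) + 1 := by
      have h1 : m + 1 = 2^(i+1) * (m/2^(i+1)) + (m % 2^(i+1) + 1) := by omega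
      rw [h1, Nat.mul_add_mod, Nat.mod_eq_of_lt hcase]
    have hbit : (m+1) &&& 2^i ≠ 0 := (pv_and_ne_iff _ i).mpr (by omega)
    have hor : (m+1) ||| 2^i = m+1 := pv_lor_self_bit _ i hbit
    rw [hor]
    exact ⟨hbit, by omega, fun s h1 h2 => by omega⟩
  · have hmod : (m+1) % 2^(i+1) = 0 := by
      have h1 : m + 1 = 2^(i+1) * (m/2^(i+1)+1) := by omega
      rw [h1, Nat.mul_mod_right]
    have hbit0 : (m+1) &&& 2^i = 0 := by
      by_contra hc
      have := (pv_and_ne_iff _ i).mp hc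
      omega
    have hor : (m+1) ||| 2^i = m + 1 + 2^i := pv_lor_add _ _ hbit0
    rw [hor]
    refine ⟨?_, by omega, ?_⟩
    · apply (pv_and_ne_iff _ i).mpr
      have h1 : m + 1 + 2^i = 2^(i+1) * (m/2^(i+1)+1) + 2^i := by omega
      rw [h1, Nat.mul_add_mod, Nat.mod_eq_of_lt (by omega)]
    · intro s h1 h2
      by_contra hc
      have := (pv_and_ne_iff s i).mp hc
      have h3 : s = 2^(i+1) * (m/2^(i+1)+1) + (s - (m+1)) := by omega
      rw [h3, Nat.mul_add_mod, Nat.mod_eq_of_lt (by omega)] at this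
      omega

-- ---- getD helpers ----
lemma pv_getD_set_ne (C : List Int) (p s : Nat) (v : Int) (h : s ≠ p) :
    (C.set p v).getD s 0 = C.getD s 0 := by
  simp [List.getD, List.getElem?_set_ne (Ne.symm h)]

lemma pv_getD_lt (C : List Int) (s : Nat) (hs : s < C.length) : C.getD s 0 = C[s] :=
  List.getD_eq_getElem _ _ hs

lemma pv_getD_ge (C : List Int) (s : Nat) (hs : C.length ≤ s) : C.getD s 0 = 0 := by
  simp [List.getD, List.getElem?_eq_none hs]

lemma pv_getD_mapIdx_lt (C : List Int) (f : Nat → Int → Int) (s : Nat) (hs : s < C.length) :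
    (C.mapIdx f).getD s 0 = f s C[s] := by
  rw [List.getD_eq_getElem _ _ (by simpa using hs), List.getElem_mapIdx]

-- ---- the layer operator: effect of one full bit layer of A on one array ----
def pvLay (b Z : Nat) (C : List Int) : List Int :=
  C.mapIdx (fun t x => if t &&& b = 0 ∧ t + b < Z then x + C.getD (t+b) 0 else x)

lemma pvLay_length (b Z : Nat) (C : List Int) : (pvLay b Z C).length = C.length := by
  simp [pvLay]

-- single-array update step of A's inner loop
def pvUpdS (b : Nat) (C : List Int) (m : Nat) : List Int :=
  C.set (m ^^^ b) (C.getD (m ^^^ b) 0 + C.getD m 0)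

-- the source indices visited by A's inner while loop
def pvSrc (b Z : Nat) : Nat → Nat → List Nat
  | _, 0 => []
  | m, fuel+1 => if m < Z then m :: pvSrc b Z ((m+1) ||| b) fuel else []

lemma pvAInner_eq_foldl (b Z : Nat) :
    ∀ fuel m st, pvAInner b Z m fuel st =
      ((pvSrc b Z m fuel).foldl (pvUpdS b) st.1, (pvSrc b Z m fuel).foldl (pvUpdS b) st.2) := by
  intro fuel
  induction fuel with
  | zero => intro m st; simp [pvAInner, pvSrc]
  | succ n ih =>
    intro m st
    rw [pvAInner, pvSrc]
    by_cases h : m < Z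
    · simp only [h, if_true, List.foldl_cons]
      rw [ih]
      rfl
    · simp [h]

-- partial superset-layer: contributions from sources in [m, Z)
def pvExt (b Z m : Nat) (C : List Int) : List Int :=
  C.mapIdx (fun t x => if t &&& b = 0 ∧ t + b < Z ∧ m ≤ t + b then x + C.getD (t+b) 0 else x)

lemma pvExt_of_ge (b Z m : Nat) (h : Z ≤ m) (C : List Int) : pvExt b Z m C = C := by
  apply List.ext_getElem (by simp [pvExt])
  intro t h1 h2
  simp only [pvExt, List.getElem_mapIdx]
  have : ¬ (t &&& b = 0 ∧ t + b < Z ∧ m ≤ t + b) := by rintro ⟨-, h3, h4⟩; omega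
  simp [this]

lemma pvExt_step (i Z m : Nat) (C : List Int) (hm : m &&& 2^i ≠ 0) (hmZ : m < Z) :
    pvExt (2^i) Z ((m+1) ||| 2^i) (pvUpdS (2^i) C m) = pvExt (2^i) Z m C := by
  obtain ⟨hsub, hclear, hle⟩ := pv_xor_sub m i hm
  obtain ⟨hbit', hlt', hgap⟩ := pv_next m i hm
  have hbpos : (0:Nat) < 2^i := Nat.two_pow_pos i
  set b := 2^i with hbdef
  set p := m ^^^ b with hpdef
  set m' := (m+1) ||| b with hmdef'
  have hpb : p + b = m := by omega
  apply List.ext_getElem (by simp [pvExt, pvUpdS])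
  intro t ht1 ht2
  have htC : t < C.length := by simpa [pvExt] using ht2
  have htC' : t < (pvUpdS b C m).length := by simpa [pvUpdS] using htC
  simp only [pvExt, List.getElem_mapIdx]
  by_cases htp : t = p
  · subst htp
    have hg1 : ¬ (p &&& b = 0 ∧ p + b < Z ∧ m' ≤ p + b) := by
      rintro ⟨-, -, h4⟩; omega
    have hg2 : p &&& b = 0 ∧ p + b < Z ∧ m ≤ p + b := ⟨hclear, by omega, by omega⟩
    rw [if_neg hg1, if_pos hg2]
    have : (pvUpdS b C m)[p]'htC' = C.getD p 0 + C.getD m 0 := by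
      simp only [pvUpdS]
      rw [List.getElem_set_self]
    rw [this, pv_getD_lt C p htC, hpb]
  · have hCt : (pvUpdS b C m)[t]'htC' = C[t]'htC := by
      simp only [pvUpdS]
      rw [List.getElem_set_ne (by omega)]
    have geq : (t &&& b = 0 ∧ t + b < Z ∧ m' ≤ t + b) ↔ (t &&& b = 0 ∧ t + b < Z ∧ m ≤ t + b) := by
      constructor
      · rintro ⟨h1, h2, h3⟩; exact ⟨h1, h2, by omega⟩
      · rintro ⟨h1, h2, h3⟩
        refine ⟨h1, h2, ?_⟩
        by_contra hc
        have hbset := pv_add_bit_and_self t i h1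
        rcases eq_or_lt_of_le h3 with heq | hlt
        · exact htp (by omega)
        · exact hbset (hgap (t+b) hlt (by omega))
    by_cases hg : t &&& b = 0 ∧ t + b < Z ∧ m ≤ t + b
    · rw [if_pos (geq.mpr hg), if_pos hg, hCt]
      have hne : t + b ≠ p := by
        rcases eq_or_lt_of_le hg.2.2 with heq | hlt
        · exact fun _ => htp (by omega)
        · omega
      rw [pvUpdS, pv_getD_set_ne _ _ _ _ hne]
    · rw [if_neg (fun h => hg (geq.mp h)), if_neg hg, hCt]

lemma pvSrc_foldl (i Z : Nat) :
    ∀ fuel m C, m &&& 2^i ≠ 0 → Z ≤ m + fuel →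
      (pvSrc (2^i) Z m fuel).foldl (pvUpdS (2^i)) C = pvExt (2^i) Z m C := by
  intro fuel
  induction fuel with
  | zero =>
    intro m C hm hZ
    simp only [pvSrc, List.foldl_nil]
    exact (pvExt_of_ge _ _ _ (by omega) C).symm
  | succ n ih =>
    intro m C hm hZ
    rw [pvSrc]
    by_cases h : m < Z
    · obtain ⟨hbit', hlt', -⟩ := pv_next m i hm
      rw [if_pos h, List.foldl_cons, ih _ _ hbit' (by omega), pvExt_step i Z m C hm h]
    · rw [if_neg h, List.foldl_nil]
      exact (pvExt_of_ge _ _ _ (by omega) C).symm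

-- A's inner loop computes the layer map
lemma pvSrc_foldl_eq_lay (i Z : Nat) (C : List Int) :
    (pvSrc (2^i) Z (2^i) Z).foldl (pvUpdS (2^i)) C = pvLay (2^i) Z C := by
  have hbb : (2:Nat)^i &&& 2^i ≠ 0 := by
    rw [Nat.and_self]; have := Nat.two_pow_pos i; omega
  rw [pvSrc_foldl i Z Z (2^i) C hbb (Nat.le_add_left Z (2^i))]
  apply List.ext_getElem (by simp [pvExt, pvLay])
  intro t h1 h2
  simp only [pvExt, pvLay, List.getElem_mapIdx]
  have : (t &&& 2^i = 0 ∧ t + 2^i < Z ∧ 2^i ≤ t + 2^i) ↔ (t &&& 2^i = 0 ∧ t + 2^i < Z) := by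
    constructor
    · rintro ⟨a, b, -⟩; exact ⟨a, b⟩
    · rintro ⟨a, b⟩; exact ⟨a, b, by omega⟩
  rw [if_congr this rfl rfl]

lemma pv_getD_lay (b Z : Nat) (C : List Int) (s : Nat) :
    (pvLay b Z C).getD s 0 =
      if s &&& b = 0 ∧ s + b < Z then C.getD s 0 + C.getD (s+b) 0 else C.getD s 0 := by
  by_cases h : s < C.length
  · rw [pvLay, pv_getD_mapIdx_lt _ _ _ h, pv_getD_lt _ _ h]
  · have hge := Nat.le_of_not_lt h
    rw [pv_getD_ge _ _ (by rw [pvLay_length]; exact hge)]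
    split_ifs with hg
    · rw [pv_getD_ge _ _ hge, pv_getD_ge _ _ (by omega)]; omega
    · rw [pv_getD_ge _ _ hge]

-- ---- A as an ascending fold of layers ----
def pvFk (Z k : Nat) (C : List Int) : List Int :=
  (List.range k).foldl (fun D j => pvLay (2^j) Z D) C

lemma pvFk_length (Z k : Nat) (C : List Int) : (pvFk Z k C).length = C.length := by
  induction k with
  | zero => rfl
  | succ n ih =>
    unfold pvFk at *
    rw [List.range_succ, List.foldl_append, List.foldl_cons, List.foldl_nil, pvLay_length, ih]

lemma pvFk_succ (Z k : Nat) (C : List Int) : pvFk Z (k+1) C = pvLay (2^k) Z (pvFk Z k C) := by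
  unfold pvFk
  rw [List.range_succ, List.foldl_append, List.foldl_cons, List.foldl_nil]

lemma pv_fst_foldl {α : Type} (g : α → List Int → List Int) (l : List α) :
    ∀ (a b : List Int),
      (l.foldl (fun st i => (g i st.1, g i st.2)) (a, b)).1 = l.foldl (fun x i => g i x) a := by
  induction l with
  | nil => intro a b; rfl
  | cons x xs ih => intro a b; simp only [List.foldl_cons]; exact ih _ _

lemma pvA_eq_fold (A B : List Int) (N : Int) :
    superset_zeta_pair A B N = pvFk A.length N.toNat A := by
  unfold superset_zeta_pair
  show ((PySem.List.pyRange 0 N 1).foldl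
    (fun st i => pvAInner (2^i.toNat) A.length (2^i.toNat) A.length st) (A, B)).1 = _
  have hbody : (fun (st : List Int × List Int) (i : Int) =>
      pvAInner (2^i.toNat) A.length (2^i.toNat) A.length st) =
      (fun st i => (pvLay (2^i.toNat) A.length st.1, pvLay (2^i.toNat) A.length st.2)) := by
    funext st i
    rw [pvAInner_eq_foldl, pvSrc_foldl_eq_lay, pvSrc_foldl_eq_lay]
  rw [hbody, pv_fst_foldl, PySem.List.pyRange_one, List.foldl_map]
  simp only [zero_add, Int.toNat_natCast, Int.sub_zero]
  rfl

-- ---- closed form of the layered fold ----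
abbrev pvCond (k t s : Nat) : Prop := s &&& t = t ∧ s ^^^ t < 2^k

lemma pv_sub_iff (s t : Nat) : s &&& t = t ↔ ∀ j, t.testBit j = true → s.testBit j = true := by
  constructor
  · intro h j hj
    have h2 : (s &&& t).testBit j = t.testBit j := by rw [h]
    rw [Nat.testBit_and, hj] at h2
    simpa using h2
  · intro h
    apply Nat.eq_of_testBit_eq
    intro j
    rw [Nat.testBit_and]
    rcases hj : t.testBit j
    · simp
    · simp [h j hj]

lemma pv_lt_step (x k : Nat) (h : x.testBit k = false) : x < 2^(k+1) ↔ x < 2^k := by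
  have hd := pv_digit x k
  have h0 : x / 2^k % 2 = 0 := by
    rcases Nat.mod_two_eq_zero_or_one (x/2^k) with h' | h'
    · exact h'
    · exact absurd ((pv_tb_iff x k).mpr h') (by simp [h])
  rw [h0, Nat.mul_zero, Nat.add_zero] at hd
  have h1 : x % 2^k < 2^k := Nat.mod_lt _ (Nat.two_pow_pos k)
  have h2 : (2:Nat)^(k+1) = 2*2^k := by ring
  constructor
  · intro hx; have := Nat.mod_eq_of_lt hx; omega
  · intro hx
    have := Nat.two_pow_pos k
    omega

lemma pv_xor_add (x k : Nat) (h : x.testBit k = false) : x ^^^ 2^k = x + 2^k := by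
  have hclear : x &&& 2^k = 0 := (pv_tb_and x k).mpr h
  rw [← pv_lor_add x (2^k) hclear]
  apply Nat.eq_of_testBit_eq
  intro j
  rcases eq_or_ne j k with rfl | hj
  · simp [Nat.testBit_xor, Nat.testBit_or, h, Nat.testBit_two_pow_self]
  · simp [Nat.testBit_xor, Nat.testBit_or, Nat.testBit_two_pow_of_ne (Ne.symm hj)]

lemma pv_add_eq_xor (t k : Nat) (h : t.testBit k = false) : t + 2^k = t ^^^ 2^k :=
  (pv_xor_add t k h).symm

lemma pv_tb_add_self (t k : Nat) (h : t.testBit k = false) : (t + 2^k).testBit k = true := by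
  rw [pv_add_eq_xor t k h, Nat.testBit_xor, h, Nat.testBit_two_pow_self]
  rfl

lemma pv_cond_ge (u s : Nat) (h : s &&& u = u) : u ≤ s := by
  calc u = s &&& u := h.symm
    _ ≤ s := Nat.and_le_left

lemma pv_cond_split (k t s : Nat) (ht : t.testBit k = false) :
    pvCond (k+1) t s ↔ pvCond k t s ∨ pvCond k (t+2^k) s := by
  have htk := pv_add_eq_xor t k ht
  constructor
  · rintro ⟨hst, hlt⟩
    rcases hx : (s ^^^ t).testBit k
    · exact Or.inl ⟨hst, (pv_lt_step _ k hx).mp hlt⟩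
    · right
      have hsk : s.testBit k = true := by
        rw [Nat.testBit_xor, ht] at hx
        simpa using hx
      constructor
      · rw [pv_sub_iff]
        intro j hj
        rw [htk, Nat.testBit_xor] at hj
        rcases eq_or_ne j k with rfl | hne
        · exact hsk
        · rw [Nat.testBit_two_pow_of_ne (Ne.symm hne)] at hj
          simp at hj
          exact (pv_sub_iff s t).mp hst j hj
      · rw [htk, ← Nat.xor_assoc]
        have hand : (s ^^^ t) &&& 2^k ≠ 0 := by
          intro hc; rw [pv_tb_and] at hc; rw [hx] at hc; cases hc
        obtain ⟨hsub', -, hge⟩ := pv_xor_sub (s ^^^ t) k hand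
        rw [hsub']
        have h2 : (2:Nat)^(k+1) = 2*2^k := by ring
        omega
  · rintro (⟨hst, hlt⟩ | ⟨hsu, hlt⟩)
    · refine ⟨hst, ?_⟩
      have h2 : (2:Nat)^(k+1) = 2*2^k := by ring
      have := Nat.two_pow_pos k
      omega
    · have huk : (t+2^k).testBit k = true := pv_tb_add_self t k ht
      have hsk : s.testBit k = true := (pv_sub_iff s (t+2^k)).mp hsu k huk
      refine ⟨?_, ?_⟩
      · rw [pv_sub_iff]
        intro j hj
        apply (pv_sub_iff s (t+2^k)).mp hsu j
        rw [htk, Nat.testBit_xor]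
        rcases eq_or_ne j k with rfl | hne
        · rw [ht] at hj; cases hj
        · rw [Nat.testBit_two_pow_of_ne (Ne.symm hne), hj]
          rfl
      · have hbit : (s ^^^ (t+2^k)).testBit k = false := by
          rw [Nat.testBit_xor, hsk, huk]
          rfl
        have hx2 : (s ^^^ (t+2^k)) ^^^ 2^k = s ^^^ t := by
          rw [htk, Nat.xor_assoc, Nat.xor_xor_cancel_right]
        rw [← hx2, pv_xor_add _ k hbit]
        have h2 : (2:Nat)^(k+1) = 2*2^k := by ring
        omega

lemma pv_cond_disjoint (k t s : Nat) (ht : t.testBit k = false) :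
    ¬ (pvCond k t s ∧ pvCond k (t+2^k) s) := by
  rintro ⟨⟨hst, hlt⟩, ⟨hsu, hlt'⟩⟩
  have hxk : (s ^^^ t).testBit k = false := Nat.testBit_lt_two_pow hlt
  have hsk : s.testBit k = false := by
    rw [Nat.testBit_xor, ht] at hxk
    simpa using hxk
  have huk : (t+2^k).testBit k = true := pv_tb_add_self t k ht
  have := (pv_sub_iff s (t+2^k)).mp hsu k huk
  rw [hsk] at this
  cases this

lemma pv_cond_stay (k t s : Nat) (ht : t.testBit k = true) :
    pvCond (k+1) t s ↔ pvCond k t s := by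
  constructor
  · rintro ⟨hst, hlt⟩
    have hsk : s.testBit k = true := (pv_sub_iff s t).mp hst k ht
    have hxk : (s ^^^ t).testBit k = false := by
      rw [Nat.testBit_xor, hsk, ht]
      rfl
    exact ⟨hst, (pv_lt_step _ k hxk).mp hlt⟩
  · rintro ⟨hst, hlt⟩
    have h2 : (2:Nat)^(k+1) = 2*2^k := by ring
    have := Nat.two_pow_pos k
    exact ⟨hst, by omega⟩

lemma pv_closed (Z : Nat) (C : List Int) :
    ∀ (k t : Nat), t < Z →
      (pvFk Z k C).getD t 0 = ∑ s ∈ Finset.range Z, if pvCond k t s then C.getD s 0 else 0 := by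
  intro k
  induction k with
  | zero =>
    intro t ht
    have h1 : ∀ s, pvCond 0 t s ↔ s = t := by
      intro s
      constructor
      · rintro ⟨-, hlt⟩
        have : s ^^^ t = 0 := by simpa using hlt
        exact Nat.xor_eq_zero_iff.mp this
      · rintro rfl
        exact ⟨Nat.and_self s, by simp⟩
    have h2 : ∑ s ∈ Finset.range Z, (if pvCond 0 t s then C.getD s 0 else 0)
        = ∑ s ∈ Finset.range Z, (if s = t then C.getD s 0 else 0) :=
      Finset.sum_congr rfl (fun s _ => if_congr (h1 s) rfl rfl)
    rw [h2, Finset.sum_ite_eq' (Finset.range Z) t, if_pos (Finset.mem_range.mpr ht)]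
    rfl
  | succ k ih =>
    intro t ht
    rw [pvFk_succ, pv_getD_lay]
    by_cases h1 : t &&& 2^k = 0
    · have htb : t.testBit k = false := (pv_tb_and t k).mp h1
      by_cases h2 : t + 2^k < Z
      · rw [if_pos ⟨h1, h2⟩, ih t ht, ih (t+2^k) h2, ← Finset.sum_add_distrib]
        apply Finset.sum_congr rfl
        intro s _
        have hsplit := pv_cond_split k t s htb
        have hdisj := pv_cond_disjoint k t s htb
        by_cases hl : pvCond k t s <;> by_cases hr : pvCond k (t+2^k) s
        · exact absurd ⟨hl, hr⟩ hdisj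
        · rw [if_pos hl, if_neg hr, if_pos (hsplit.mpr (Or.inl hl)), add_zero]
        · rw [if_neg hl, if_pos hr, if_pos (hsplit.mpr (Or.inr hr)), zero_add]
        · rw [if_neg hl, if_neg hr, if_neg (fun hc => ((hsplit.mp hc).elim hl hr)), add_zero]
      · rw [if_neg (fun hc => h2 hc.2), ih t ht]
        apply Finset.sum_congr rfl
        intro s hs
        have hsZ := Finset.mem_range.mp hs
        refine if_congr ?_ rfl rfl
        constructor
        · intro hl
          exact (pv_cond_split k t s htb).mpr (Or.inl hl)
        · intro hl
          rcases (pv_cond_split k t s htb).mp hl with h | h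
          · exact h
          · exact absurd (pv_cond_ge _ _ h.1) (by omega)
    · have htb : t.testBit k = true := by
        rcases h : t.testBit k
        · exact absurd ((pv_tb_and t k).mpr h) h1
        · rfl
      rw [if_neg (fun hc => h1 hc.1), ih t ht]
      exact Finset.sum_congr rfl (fun s _ => if_congr (pv_cond_stay k t s htb).symm rfl rfl)

-- ---- B as the same closed form ----
lemma pv_foldl_sum (f : Nat → Int) (p : Nat → Bool) (n : Nat) :
    ∀ a : Int, (List.range n).foldl (fun acc s => if p s then acc + f s else acc) a
      = a + ∑ s ∈ Finset.range n, if p s then f s else 0 := by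
  induction n with
  | zero => intro a; simp
  | succ m ih =>
    intro a
    rw [List.range_succ, List.foldl_append, ih, Finset.sum_range_succ,
      List.foldl_cons, List.foldl_nil]
    split_ifs with h <;> omega

lemma pv_mask_iff (x k : Nat) : ((x &&& (2^k - 1)) = x) ↔ x < 2^k := by
  rw [Nat.and_two_pow_sub_one_eq_mod]
  constructor
  · intro h; rw [← h]; exact Nat.mod_lt _ (Nat.two_pow_pos k)
  · exact Nat.mod_eq_of_lt

lemma pv_mask_eq (N : Int) : (if 0 < N then 2 ^ N.toNat - 1 else 0) = 2 ^ N.toNat - 1 := by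
  split_ifs with h
  · rfl
  · have h0 : N.toNat = 0 := by omega
    rw [h0]
    rfl

lemma pv_cond_decide (k t s : Nat) :
    ((s &&& t == t) && ((s ^^^ t) &&& (2^k - 1) == s ^^^ t)) = true ↔ pvCond k t s := by
  rw [Bool.and_eq_true, beq_iff_eq, beq_iff_eq, pv_mask_iff]

lemma pvAlt_eq (A B : List Int) (N : Int) :
    superset_zeta_pair_alt A B N = (List.range A.length).map (fun t =>
      ∑ s ∈ Finset.range A.length, if pvCond N.toNat t s then A.getD s 0 else 0) := by
  unfold superset_zeta_pair_alt
  simp only [pv_mask_eq]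
  apply List.map_congr_left
  intro t _
  rw [pv_foldl_sum (fun s => A.getD s 0)
    (fun s => (s &&& t == t) && ((s ^^^ t) &&& (2^N.toNat - 1) == s ^^^ t)), zero_add]
  exact Finset.sum_congr rfl (fun s _ => if_congr (pv_cond_decide N.toNat t s) rfl rfl)

-- ===== VERDICT (by name: the statement is the Claim_ definition above) =====
theorem superset_zeta_pair_spec : Claim_equal_superset_zeta_pair := by
  intro A B N _ _
  unfold Spec_superset_zeta_pair
  rw [pvA_eq_fold, pvAlt_eq]
  apply List.ext_getElem
  · rw [pvFk_length]
    simp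
  · intro t h1 h2
    have htZ : t < A.length := by
      rw [pvFk_length] at h1
      exact h1
    rw [List.getElem_map, List.getElem_range, ← pv_getD_lt _ t h1]
    exact pv_closed A.length A N.toNat t htZ
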